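-- pv_equiv track=rewrite | github.com/dmh4681/algo-sovereignty-analyzer | api/services/infra_audit.py | normalize_provider
-- ===== SOURCE A (Python) =====
-- PROVIDER_NORMALIZATION = {
--     # Hyperscale cloud providers (Tier 3)
--     "amazon": "Amazon AWS",
--     "aws": "Amazon AWS",
--     "google": "Google Cloud",
--     "microsoft": "Microsoft Azure",
--     "azure": "Microsoft Azure",
--     "alibaba": "Alibaba Cloud",
--     "oracle": "Oracle Cloud",
--     "ibm cloud": "IBM Cloud",
--     "tencent": "Tencent Cloud",
--     # Corporate hosting providers (Tier 2)
--     "ovh": "OVHcloud",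
--     "hetzner": "Hetzner",
--     "digitalocean": "DigitalOcean",
--     "linode": "Linode/Akamai",
--     "akamai": "Linode/Akamai",
--     "vultr": "Vultr",
--     "choopa": "Vultr",
--     "constant company": "Vultr",
--     "teraswitch": "TeraSwitch",
--     "leaseweb": "Leaseweb",
--     "contabo": "Contabo",
--     "scaleway": "Scaleway",
--     "equinix": "Equinix",
--     "rackspace": "Rackspace",
--     "softlayer": "IBM/SoftLayer",
--     "cloudflare": "Cloudflare",
--     "phoenixnap": "PhoenixNAP",
--     "quadranet": "QuadraNet",
--     "colocrossing": "ColoCrossing",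
--     "hurricane electric": "Hurricane Electric",
--     "he.net": "Hurricane Electric",
--     "cogent": "Cogent",
--     "ntt": "NTT",
--     "telia": "Telia",
--     "zayo": "Zayo",
--     "lumen": "Lumen/CenturyLink",
--     "level3": "Lumen/CenturyLink",
--     "centurylink": "Lumen/CenturyLink",
-- }
--
-- def normalize_provider(isp: str, org: str) -> str:
--     """
--     Normalize provider name to consolidate variants.
--
--     This merges different legal entities of the same company:
--     - "OVH US LLC", "OVH GmbH", "OVH SAS" -> "OVHcloud"
--     - "Amazon.com", "AWS", "Amazon Technologies" -> "Amazon AWS"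
--
--     Uses substring matching (case-insensitive) for flexibility.
--     """
--     # Combine ISP and org strings for searching
--     combined = f"{isp} {org}".lower()
--
--     # Check against normalization rules (order matters - check longer matches first)
--     # Sort by key length descending to match longer strings first
--     for pattern, canonical in sorted(PROVIDER_NORMALIZATION.items(), key=lambda x: -len(x[0])):
--         if pattern in combined:
--             return canonical
--
--     # No match found - return the most meaningful identifier
--     if org and org != "Unknown" and len(org) > 3:
--         return org
--     if isp and isp != "Unknown":
--         return isp
--     return "Unknown"
-- ===== SOURCE B (Python) =====
-- PROVIDER_NORMALIZATION = {
--     "amazon": "Amazon AWS",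
--     "aws": "Amazon AWS",
--     "google": "Google Cloud",
--     "microsoft": "Microsoft Azure",
--     "azure": "Microsoft Azure",
--     "alibaba": "Alibaba Cloud",
--     "oracle": "Oracle Cloud",
--     "ibm cloud": "IBM Cloud",
--     "tencent": "Tencent Cloud",
--     "ovh": "OVHcloud",
--     "hetzner": "Hetzner",
--     "digitalocean": "DigitalOcean",
--     "linode": "Linode/Akamai",
--     "akamai": "Linode/Akamai",
--     "vultr": "Vultr",
--     "choopa": "Vultr",
--     "constant company": "Vultr",
--     "teraswitch": "TeraSwitch",
--     "leaseweb": "Leaseweb",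
--     "contabo": "Contabo",
--     "scaleway": "Scaleway",
--     "equinix": "Equinix",
--     "rackspace": "Rackspace",
--     "softlayer": "IBM/SoftLayer",
--     "cloudflare": "Cloudflare",
--     "phoenixnap": "PhoenixNAP",
--     "quadranet": "QuadraNet",
--     "colocrossing": "ColoCrossing",
--     "hurricane electric": "Hurricane Electric",
--     "he.net": "Hurricane Electric",
--     "cogent": "Cogent",
--     "ntt": "NTT",
--     "telia": "Telia",
--     "zayo": "Zayo",
--     "lumen": "Lumen/CenturyLink",
--     "level3": "Lumen/CenturyLink",
--     "centurylink": "Lumen/CenturyLink",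
-- }
--
--
-- def normalize_provider(isp: str, org: str) -> str:
--     """Normalize provider name: no sort and no early exit -- a single pass over
--     the dict keeps the (length, canonical) of the longest matching pattern seen
--     so far; strict '>' keeps the first-inserted pattern on equal lengths, which
--     reproduces A's stable sort-by-descending-length first hit exactly."""
--     combined = (isp + " " + org).lower()
--     best = None
--     for p, c in PROVIDER_NORMALIZATION.items():
--         if p in combined:
--             if best is None or best[0] < len(p):
--                 best = (len(p), c)
--     if best is not None:
--         return best[1]
--     # fallback chain written as one scan over the two candidates
--     for s in ((org if len(org) > 3 else ""), isp):
--         if s and s != "Unknown":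
--             return s
--     return "Unknown"
-- ===== Notes on version B (the rewrite author's own statement) =====
-- stated objective: alternative
-- what changed: Replaces A's sort-by-descending-key-length pass with early-exit return by a single accumulator pass over the dict in insertion order that keeps the longest matching pattern seen so far (strict '>' preserves the stable sort's first-on-tie behaviour), and folds the fallback chain into one scan over the two candidate strings.
import Mathlib
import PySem

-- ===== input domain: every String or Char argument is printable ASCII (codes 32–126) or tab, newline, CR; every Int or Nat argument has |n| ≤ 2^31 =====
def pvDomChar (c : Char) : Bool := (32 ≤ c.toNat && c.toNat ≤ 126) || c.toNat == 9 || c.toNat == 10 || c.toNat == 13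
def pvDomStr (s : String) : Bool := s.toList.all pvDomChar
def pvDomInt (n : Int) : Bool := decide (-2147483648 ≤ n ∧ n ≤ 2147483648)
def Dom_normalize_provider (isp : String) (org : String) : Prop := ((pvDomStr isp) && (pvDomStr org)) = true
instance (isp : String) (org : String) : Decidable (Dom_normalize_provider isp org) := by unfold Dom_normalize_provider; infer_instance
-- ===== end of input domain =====

-- B replaces A's sort-by-descending-length-then-first-hit by a single accumulator pass that
-- keeps the longest matching pattern seen so far (strict '>' keeps the first on ties), and
-- folds the fallback chain into one scan over two candidates; alternative decomposition,
-- same result. (Return value only; neither program mutates anything.)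

-- PROVIDER_NORMALIZATION, a module-level dict literal with distinct keys, in insertion order
def providerNormalization : List (String × String) :=
  [("amazon", "Amazon AWS"), ("aws", "Amazon AWS"), ("google", "Google Cloud"),
   ("microsoft", "Microsoft Azure"), ("azure", "Microsoft Azure"), ("alibaba", "Alibaba Cloud"),
   ("oracle", "Oracle Cloud"), ("ibm cloud", "IBM Cloud"), ("tencent", "Tencent Cloud"),
   ("ovh", "OVHcloud"), ("hetzner", "Hetzner"), ("digitalocean", "DigitalOcean"),
   ("linode", "Linode/Akamai"), ("akamai", "Linode/Akamai"), ("vultr", "Vultr"),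
   ("choopa", "Vultr"), ("constant company", "Vultr"), ("teraswitch", "TeraSwitch"),
   ("leaseweb", "Leaseweb"), ("contabo", "Contabo"), ("scaleway", "Scaleway"),
   ("equinix", "Equinix"), ("rackspace", "Rackspace"), ("softlayer", "IBM/SoftLayer"),
   ("cloudflare", "Cloudflare"), ("phoenixnap", "PhoenixNAP"), ("quadranet", "QuadraNet"),
   ("colocrossing", "ColoCrossing"), ("hurricane electric", "Hurricane Electric"),
   ("he.net", "Hurricane Electric"), ("cogent", "Cogent"), ("ntt", "NTT"),
   ("telia", "Telia"), ("zayo", "Zayo"), ("lumen", "Lumen/CenturyLink"),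
   ("level3", "Lumen/CenturyLink"), ("centurylink", "Lumen/CenturyLink")]

-- ===== PORT A =====
-- the 'for pattern, canonical in …: if pattern in combined: return canonical' loop
def pnScan (combined : String) : List (String × String) → Option String
  | [] => none
  | (pat, canon) :: rest =>
      if PySem.Str.isIn pat combined then some canon else pnScan combined rest

def normalize_provider (isp : String) (org : String) : String :=
  let combined := PySem.Str.lower (isp ++ " " ++ org)
  match pnScan combined
      (PySem.List.sorted providerNormalization (fun x => -(PySem.Str.len x.1 : Int)) false) with
  | some canonical => canonical
  | none =>
      if org ≠ "" ∧ org ≠ "Unknown" ∧ 3 < PySem.Str.len org then org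
      else if isp ≠ "" ∧ isp ≠ "Unknown" then isp
      else "Unknown"

-- ===== PORT B =====
-- one 'for p, c in items(): if p in combined: if best is None or best[0] < len(p): …' pass
def pnStep (combined : String) (best : Option (Int × String)) (pc : String × String) :
    Option (Int × String) :=
  if PySem.Str.isIn pc.1 combined then
    match best with
    | none => some (PySem.Str.len pc.1, pc.2)
    | some b =>
        if b.1 < PySem.Str.len pc.1 then some (PySem.Str.len pc.1, pc.2) else best
  else best

def normalize_provider_alt (isp : String) (org : String) : String :=
  let combined := PySem.Str.lower (isp ++ " " ++ org)
  match providerNormalization.foldl (pnStep combined) none with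
  | some b => b.2
  | none =>
      -- 'for s in ((org if len(org) > 3 else ""), isp): if s and s != "Unknown": return s'
      match [(if 3 < PySem.Str.len org then org else ""), isp].find?
          (fun s => !(s == "") && !(s == "Unknown")) with
      | some s => s
      | none => "Unknown"

-- ===== PRECONDITION & SPEC =====
def Spec_normalize_provider (isp : String) (org : String) (out : String) : Prop := out = normalize_provider_alt isp org
instance (isp : String) (org : String) (out : String) : Decidable (Spec_normalize_provider isp org out) := by unfold Spec_normalize_provider; infer_instance

-- ===== CLAIM (what is proved, stated in full; the proofs are below) =====
def Claim_equal_normalize_provider : Prop := ∀ (isp : String) (org : String), Dom_normalize_provider isp org → Spec_normalize_provider isp org (normalize_provider isp org)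

-- ===== LEMMAS AND PROOFS =====

-- a stable descending insertion sort (proof device; A's sorted literal evaluates to it)
def insDesc {α : Type} (key : α → Int) (x : α) : List α → List α
  | [] => [x]
  | y :: ys => if key x < key y then y :: insDesc key x ys else x :: y :: ys

def isortD {α : Type} (key : α → Int) : List α → List α
  | [] => []
  | x :: xs => insDesc key x (isortD key xs)

-- the first element of maximal key (what both first-hit and strict-'<' argmax compute)
def firstMax? {α : Type} (key : α → Int) : List α → Option α
  | [] => none
  | x :: xs =>
      match firstMax? key xs with
      | none => some x
      | some y => if key x < key y then some y else some x

lemma mem_insDesc {α : Type} (key : α → Int) (x a : α) (l : List α) :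
    a ∈ insDesc key x l ↔ a = x ∨ a ∈ l := by
  induction l with
  | nil => simp [insDesc]
  | cons y ys ih =>
      by_cases h : key x < key y <;> simp [insDesc, h, ih] <;> tauto

lemma pairwise_insDesc {α : Type} (key : α → Int) (x : α) (l : List α)
    (h : l.Pairwise (fun a b => key b ≤ key a)) :
    (insDesc key x l).Pairwise (fun a b => key b ≤ key a) := by
  induction l with
  | nil => simp [insDesc]
  | cons y ys ih =>
      rcases List.pairwise_cons.mp h with ⟨hy, hys⟩
      by_cases hxy : key x < key y
      · simp only [insDesc, if_pos hxy]
        refine List.pairwise_cons.mpr ⟨?_, ih hys⟩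
        intro a ha
        rcases (mem_insDesc key x a ys).mp ha with rfl | ha
        · omega
        · exact hy a ha
      · simp only [insDesc, if_neg hxy]
        refine List.pairwise_cons.mpr ⟨?_, h⟩
        intro a ha
        rcases List.mem_cons.mp ha with rfl | ha
        · omega
        · have := hy a ha; omega

lemma pairwise_isortD {α : Type} (key : α → Int) (L : List α) :
    (isortD key L).Pairwise (fun a b => key b ≤ key a) := by
  induction L with
  | nil => simp [isortD]
  | cons x xs ih => exact pairwise_insDesc key x _ ih

lemma find?_insDesc_neg {α : Type} (key : α → Int) (p : α → Bool) (x : α) (l : List α)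
    (hp : p x = false) : (insDesc key x l).find? p = l.find? p := by
  induction l with
  | nil => simp [insDesc, List.find?, hp]
  | cons y ys ih =>
      by_cases h : key x < key y
      · simp only [insDesc, if_pos h, List.find?]
        cases hy : p y <;> simp [ih]
      · simp [insDesc, if_neg h, List.find?, hp]

lemma find?_insDesc_pos {α : Type} (key : α → Int) (p : α → Bool) (x : α) (l : List α)
    (hp : p x = true) (hl : l.Pairwise (fun a b => key b ≤ key a)) :
    (insDesc key x l).find? p =
      match l.find? p with
      | none => some x
      | some y => if key x < key y then some y else some x := by
  induction l with
  | nil => simp [insDesc, List.find?, hp]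
  | cons y ys ih =>
      rcases List.pairwise_cons.mp hl with ⟨hy, hys⟩
      by_cases h : key x < key y
      · have hins : insDesc key x (y :: ys) = y :: insDesc key x ys := by
          simp [insDesc, h]
        rw [hins]
        cases hpy : p y
        · simp only [List.find?, hpy]
          exact ih hys
        · simp [List.find?, hpy, h]
      · have hins : insDesc key x (y :: ys) = x :: y :: ys := by
          simp [insDesc, h]
        rw [hins]
        cases hfind : (y :: ys).find? p with
        | none => simp [List.find?, hp]
        | some z =>
            have hz : z ∈ y :: ys := List.mem_of_find?_eq_some hfind
            have hzy : key z ≤ key y := by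
              rcases List.mem_cons.mp hz with rfl | hz'
              · exact le_refl _
              · exact hy z hz'
            have hnx : ¬ key x < key z := by omega
            simp [List.find?, hp, hnx]

lemma find?_isortD_eq_firstMax {α : Type} (key : α → Int) (p : α → Bool) (L : List α) :
    (isortD key L).find? p = firstMax? key (L.filter p) := by
  induction L with
  | nil => rfl
  | cons x xs ih =>
      cases hpx : p x
      · rw [isortD, find?_insDesc_neg key p x _ hpx, ih]
        simp [List.filter, hpx]
      · rw [isortD, find?_insDesc_pos key p x _ hpx (pairwise_isortD key xs), ih]
        simp only [List.filter, hpx, firstMax?]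

lemma pnScan_eq_find? (combined : String) (l : List (String × String)) :
    pnScan combined l = (l.find? (fun pc => PySem.Str.isIn pc.1 combined)).map (·.2) := by
  induction l with
  | nil => rfl
  | cons m rest ih =>
      obtain ⟨pat, canon⟩ := m
      cases h : PySem.Str.isIn pat combined <;>
        simp only [pnScan, List.find?_cons, ih, h, Bool.false_eq_true, if_false, if_true,
          Option.map]

-- A's concrete sorted list equals our stable descending insertion sort of the dict
lemma sorted_eq_isortD :
    PySem.List.sorted providerNormalization (fun x => -(PySem.Str.len x.1 : Int)) false
      = isortD (fun pc => PySem.Str.len pc.1) providerNormalization := by decide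

-- pnStep ignores non-matching entries, so the fold runs over the filtered list
def pnStep' (best : Option (Int × String)) (pc : String × String) : Option (Int × String) :=
  match best with
  | none => some (PySem.Str.len pc.1, pc.2)
  | some b => if b.1 < PySem.Str.len pc.1 then some (PySem.Str.len pc.1, pc.2) else best

lemma foldl_pnStep_filter (combined : String) (L : List (String × String)) :
    ∀ acc, L.foldl (pnStep combined) acc
      = (L.filter (fun pc => PySem.Str.isIn pc.1 combined)).foldl pnStep' acc := by
  induction L with
  | nil => intro acc; rfl
  | cons x xs ih =>
      intro acc
      cases h : PySem.Str.isIn x.1 combined <;>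
        simp only [List.foldl_cons, List.filter_cons, h, if_true, if_false, ih, pnStep,
          pnStep', Bool.false_eq_true]

-- the strict-'<' accumulator pass computes the first element of maximal length
lemma foldl_pnStep'_eq_firstMax (M : List (String × String)) :
    ∀ acc, M.foldl pnStep' acc =
      match firstMax? (fun pc => PySem.Str.len pc.1) M with
      | none => acc
      | some y =>
          match acc with
          | none => some (PySem.Str.len y.1, y.2)
          | some b => if b.1 < PySem.Str.len y.1 then some (PySem.Str.len y.1, y.2) else acc := by
  induction M with
  | nil => intro acc; rfl
  | cons x xs ih =>
      intro acc
      rw [List.foldl_cons, ih]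
      simp only [firstMax?]
      cases hz : firstMax? (fun pc => PySem.Str.len pc.1) xs with
      | none => cases acc with
          | none => rfl
          | some b => rfl
      | some z =>
          cases acc with
          | none =>
              simp only [pnStep']
              by_cases h1 : x.1.length < z.1.length <;> simp [h1]
          | some b =>
              simp only [pnStep']
              by_cases h1 : x.1.length < z.1.length <;>
                by_cases h2 : b.1 < (x.1.length : Int)
              · have h3 : b.1 < (z.1.length : Int) := by omega
                simp [h1, h2, h3]
              · simp [h1, h2]
              · simp [h1, h2]
              · have h3 : ¬ b.1 < (z.1.length : Int) := by omega
                simp [h1, h2, h3]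

-- the two fallback decompositions agree
lemma fallback_eq (isp org : String) :
    (match [(if 3 < PySem.Str.len org then org else ""), isp].find?
        (fun s => !(s == "") && !(s == "Unknown")) with
     | some s => s
     | none => "Unknown")
    = (if org ≠ "" ∧ org ≠ "Unknown" ∧ 3 < PySem.Str.len org then org
       else if isp ≠ "" ∧ isp ≠ "Unknown" then isp else "Unknown") := by
  by_cases hlen : 3 < PySem.Str.len org <;>
    by_cases ho1 : org = "" <;> by_cases ho2 : org = "Unknown" <;>
      by_cases hi1 : isp = "" <;> by_cases hi2 : isp = "Unknown" <;>
        simp_all [List.find?, PySem.Str.len, beq_iff_eq, beq_eq_decide]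

-- ===== VERDICT (by name: the statement is the Claim_ definition above) =====
theorem normalize_provider_spec : Claim_equal_normalize_provider := by
  intro isp org _
  unfold Spec_normalize_provider normalize_provider normalize_provider_alt
  generalize PySem.Str.lower (isp ++ " " ++ org) = combined
  simp only []
  rw [sorted_eq_isortD, pnScan_eq_find?,
      find?_isortD_eq_firstMax (α := String × String) (fun pc => PySem.Str.len pc.1)
        (fun pc => PySem.Str.isIn pc.1 combined) providerNormalization,
      foldl_pnStep_filter combined providerNormalization none,
      foldl_pnStep'_eq_firstMax]
  cases firstMax? (fun pc : String × String => (PySem.Str.len pc.1 : Int))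
      (providerNormalization.filter (fun pc => PySem.Str.isIn pc.1 combined)) with
  | some y => rfl
  | none => simpa using (fallback_eq isp org).symm
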